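-- pv_equiv track=rewrite | github.com/kritikaagrawal1405/AI-Powered-Intelligent-Railway-Network-Passenger-Intelligence-System | railway-backend/src/intelligence/ai_assistant.py | _extract_two_stations
-- ===== SOURCE A (Python) =====
-- def _extract_two_stations(text: str, station_list: list) -> tuple:
--     """Extract source and destination station from text."""
--     # Common city aliases → canonical station name
--     aliases = {
--         "mumbai":   "C Shivaji Term Mumbai",
--         "delhi":    "New Delhi",
--         "chennai":  "Chennai Central",
--         "kolkata":  "Howrah Jn",
--         "howrah":   "Howrah Jn",
--         "bangalore":"Bangalore City",
--         "bengaluru":"Bangalore City",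
--         "hyderabad":"Secunderabad",
--         "pune":     "Pune Jn",
--     }
--     # Substitute aliases in text
--     text_sub = text.lower()
--     for alias, canonical in aliases.items():
--         text_sub = text_sub.replace(alias, canonical.lower())
--
--     # Now extract from substituted text
--     found = []
--     for station in sorted(station_list, key=len, reverse=True):
--         if station.lower() in text_sub and station not in found:
--             found.append(station)
--         if len(found) == 2:
--             break
--     src = found[0] if len(found) > 0 else None
--     dst = found[1] if len(found) > 1 else None
--     return src, dst
-- ===== SOURCE B (Python) =====
-- def _extract_two_stations(text: str, station_list: list) -> tuple:
--     """Extract source and destination station from text."""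
--     aliases = {
--         "mumbai":   "C Shivaji Term Mumbai",
--         "delhi":    "New Delhi",
--         "chennai":  "Chennai Central",
--         "kolkata":  "Howrah Jn",
--         "howrah":   "Howrah Jn",
--         "bangalore":"Bangalore City",
--         "bengaluru":"Bangalore City",
--         "hyderabad":"Secunderabad",
--         "pune":     "Pune Jn",
--     }
--     text_sub = text.lower()
--     for alias, canonical in aliases.items():
--         text_sub = text_sub.replace(alias, canonical.lower())
--
--     # Sort-free top-2 selection: one pass keeping the two longest matches,
--     # strict comparisons so the earliest station wins on equal lengths.
--     best = None
--     second = None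
--     for station in station_list:
--         if station.lower() not in text_sub:
--             continue
--         if best is None or len(station) > len(best):
--             best, second = station, best
--         elif station != best and (second is None or len(station) > len(second)):
--             second = station
--     return best, second
-- ===== Notes on version B (the rewrite author's own statement) =====
-- stated objective: alternative
-- what changed: Replaces A's sort-the-whole-list-by-length-then-scan-with-a-found-list by a single sort-free pass that maintains the two longest matching stations with strict length comparisons (so ties keep the earlier station) and an equality guard replacing the dedup check.
import Mathlib
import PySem

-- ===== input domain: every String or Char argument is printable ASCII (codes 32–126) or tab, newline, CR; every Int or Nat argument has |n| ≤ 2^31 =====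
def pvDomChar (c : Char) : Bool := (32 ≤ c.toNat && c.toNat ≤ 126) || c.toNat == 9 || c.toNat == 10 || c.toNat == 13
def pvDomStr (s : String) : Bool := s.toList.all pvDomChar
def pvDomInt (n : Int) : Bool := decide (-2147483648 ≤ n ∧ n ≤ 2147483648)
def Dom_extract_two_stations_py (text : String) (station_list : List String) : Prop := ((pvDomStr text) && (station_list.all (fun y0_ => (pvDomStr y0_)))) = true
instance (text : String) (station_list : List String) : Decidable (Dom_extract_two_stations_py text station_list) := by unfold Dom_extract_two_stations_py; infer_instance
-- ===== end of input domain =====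

-- B replaces A's sort-by-length-then-scan by a single sort-free pass keeping the two longest
-- matching stations (strict comparisons, so the earlier station wins ties): an alternative algorithm.


-- ===== PORT A =====
-- the aliases dict (string keys, all distinct) as an insertion-ordered association list
def pvAliases : List (String × String) :=
  [("mumbai", "C Shivaji Term Mumbai"), ("delhi", "New Delhi"), ("chennai", "Chennai Central"),
   ("kolkata", "Howrah Jn"), ("howrah", "Howrah Jn"), ("bangalore", "Bangalore City"),
   ("bengaluru", "Bangalore City"), ("hyderabad", "Secunderabad"), ("pune", "Pune Jn")]

-- text_sub = text.lower(); for alias, canonical in aliases.items(): text_sub = text_sub.replace(alias, canonical.lower())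
-- (this alias-substitution phase is identical in A and B, hence shared)
def pvTextSub (text : String) : String :=
  pvAliases.foldl (fun acc kv => PySem.Str.replace acc kv.1 (PySem.Str.lower kv.2)) (PySem.Str.lower text)

-- the 'for station in sorted(...)' loop over the remaining stations, with the 'break' at len(found) == 2
def pvLoopA (T : String) : List String → List String → List String
  | [], found => found
  | st :: rest, found =>
    let found' := if PySem.Str.isIn (PySem.Str.lower st) T && !(found.contains st)
                  then found ++ [st] else found
    if found'.length == 2 then found' else pvLoopA T rest found'

def extract_two_stations_py (text : String) (station_list : List String) : Option String × Option String :=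
  let text_sub := pvTextSub text
  let found := pvLoopA text_sub (PySem.List.sorted station_list (fun s => PySem.Str.len s) true) []
  (if found.length > 0 then PySem.List.pyGet? found 0 else none,
   if found.length > 1 then PySem.List.pyGet? found 1 else none)

-- ===== PORT B =====
-- one iteration of B's loop: keep the two longest matches, strict comparisons, skip a duplicate of best
def pvStep (T : String) (bs : Option String × Option String) (station : String) :
    Option String × Option String :=
  if !(PySem.Str.isIn (PySem.Str.lower station) T) then bs
  else if (match bs.1 with
           | none => true
           | some b => decide (PySem.Str.len b < PySem.Str.len station)) then (some station, bs.1)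
  else if (bs.1 != some station) &&
          (match bs.2 with
           | none => true
           | some c => decide (PySem.Str.len c < PySem.Str.len station)) then (bs.1, some station)
  else bs

def extract_two_stations_py_alt (text : String) (station_list : List String) : Option String × Option String :=
  let text_sub := pvTextSub text
  station_list.foldl (pvStep text_sub) (none, none)

-- ===== PRECONDITION & SPEC =====
def Spec_extract_two_stations_py (text : String) (station_list : List String) (out : Option String × Option String) : Prop := out = extract_two_stations_py_alt text station_list
instance (text : String) (station_list : List String) (out : Option String × Option String) : Decidable (Spec_extract_two_stations_py text station_list out) := by unfold Spec_extract_two_stations_py; infer_instance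

-- ===== CLAIM (what is proved, stated in full; the proofs are below) =====
def Claim_equal_extract_two_stations_py : Prop := ∀ (text : String) (station_list : List String), Dom_extract_two_stations_py text station_list → Spec_extract_two_stations_py text station_list (extract_two_stations_py text station_list)

-- ===== LEMMAS AND PROOFS =====

-- A's loop, abstracted over the matching test
def genLoop {α : Type} [DecidableEq α] (q : α → Bool) : List α → List α → List α
  | [], found => found
  | st :: rest, found =>
    let found' := if q st && !(found.contains st) then found ++ [st] else found
    if found'.length == 2 then found' else genLoop q rest found'

-- the (src, dst) pair read off an (already filtered) match list
def genScan' {α : Type} [DecidableEq α] (N : List α) : Option α × Option α :=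
  match N with
  | [] => (none, none)
  | b :: t => (some b, t.find? (fun c => c != b))

-- B's loop body, abstracted over the matching test and the length key
def genStep {α : Type} [DecidableEq α] (q : α → Bool) (len : α → Int)
    (bs : Option α × Option α) (x : α) : Option α × Option α :=
  if !(q x) then bs
  else if (match bs.1 with
           | none => true
           | some b => decide (len b < len x)) then (some x, bs.1)
  else if (bs.1 != some x) &&
          (match bs.2 with
           | none => true
           | some c => decide (len c < len x)) then (bs.1, some x)
  else bs

def pvScan (T : String) (L : List String) : Option String × Option String :=
  genScan' (L.filter (fun st => PySem.Str.isIn (PySem.Str.lower st) T))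

theorem insertBy_nil {α : Type} (bef : α → α → Bool) (x : α) :
    PySem.List.insertBy bef x [] = [x] := rfl

theorem insertBy_cons {α : Type} (bef : α → α → Bool) (x y : α) (ys : List α) :
    PySem.List.insertBy bef x (y :: ys) =
      if bef x y then x :: y :: ys else y :: PySem.List.insertBy bef x ys := rfl

theorem genLoop_one {α : Type} [DecidableEq α] (q : α → Bool) (L : List α) (b : α) :
    genLoop q L [b] =
      match L.find? (fun c => q c && (c != b)) with
      | none => [b]
      | some c => [b, c] := by
  induction L with
  | nil => simp [genLoop]
  | cons st rest ih =>
    rw [genLoop, List.find?_cons]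
    by_cases hq : q st = true
    · by_cases hb : st = b
      · subst hb; simp [hq, ih]
      · have hbb : (st != b) = true := by simp [hb]
        simp [hq, hb, hbb]
    · simp [hq, ih]

theorem genLoop_nil {α : Type} [DecidableEq α] (q : α → Bool) (L : List α) :
    genLoop q L [] =
      match L.filter q with
      | [] => []
      | b :: t => match t.find? (fun c => c != b) with
                  | none => [b]
                  | some c => [b, c] := by
  induction L with
  | nil => simp [genLoop]
  | cons st rest ih =>
    rw [genLoop, List.filter_cons]
    by_cases hq : q st = true
    · simp [hq, genLoop_one]; rfl
    · simp [hq, ih]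

theorem filter_insertBy_neg {α : Type} (bef : α → α → Bool) (pq : α → Bool) (x : α)
    (M : List α) (hx : pq x = false) :
    (PySem.List.insertBy bef x M).filter pq = M.filter pq := by
  induction M with
  | nil => simp [insertBy_nil, hx]
  | cons y ys ih =>
    rw [insertBy_cons]
    by_cases hb : bef x y = true
    · simp [hb, hx]
    · simp [hb, List.filter_cons, ih]

theorem filter_insertBy_pos {α : Type} (bef : α → α → Bool) (pq : α → Bool) (x : α)
    (M : List α) (h : M.Pairwise (fun a b => bef x a = true → bef x b = true))
    (hx : pq x = true) :
    (PySem.List.insertBy bef x M).filter pq = PySem.List.insertBy bef x (M.filter pq) := by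
  induction M with
  | nil => simp [insertBy_nil, hx]
  | cons y ys ih =>
    rw [insertBy_cons]
    rcases List.pairwise_cons.mp h with ⟨hy, hys⟩
    by_cases hb : bef x y = true
    · by_cases hq : pq y = true
      · simp [hb, hx, hq, List.filter_cons, insertBy_cons]
      · -- y filtered out; all of ys have bef x · = true, so insertBy puts x in front of filter ys
        have hall : ∀ c ∈ ys.filter pq, bef x c = true := by
          intro c hc; exact hy c (List.mem_of_mem_filter hc) hb
        have hfront : PySem.List.insertBy bef x (ys.filter pq) = x :: ys.filter pq := by
          cases hys' : ys.filter pq with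
          | nil => rfl
          | cons z zs =>
            rw [insertBy_cons, if_pos]
            exact hall z (by rw [hys']; exact List.mem_cons_self ..)
        simp [hb, hx, hq, List.filter_cons, hfront]
    · by_cases hq : pq y = true
      · simp [List.filter_cons, hq, hb, insertBy_cons, ih hys]
      · simp [List.filter_cons, hq, hb, ih hys]

theorem find?_insertBy_neg {α : Type} (bef : α → α → Bool) (pf : α → Bool) (x : α)
    (t : List α) (hx : pf x = false) :
    (PySem.List.insertBy bef x t).find? pf = t.find? pf := by
  induction t with
  | nil => simp [insertBy_nil, hx]
  | cons y ys ih =>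
    rw [insertBy_cons]
    by_cases hb : bef x y = true
    · simp [hb, hx, List.find?_cons]
    · simp [hb, List.find?_cons]
      cases hpy : pf y <;> simp [ih]

theorem find?_insertBy_pos {α : Type} (bef : α → α → Bool) (pf : α → Bool) (x : α)
    (t : List α) (h : t.Pairwise (fun a b => bef x a = true → bef x b = true))
    (hx : pf x = true) :
    (PySem.List.insertBy bef x t).find? pf =
      match t.find? pf with
      | none => some x
      | some c => if bef x c then some x else some c := by
  induction t with
  | nil => simp [insertBy_nil, hx]
  | cons y ys ih =>
    rw [insertBy_cons]
    rcases List.pairwise_cons.mp h with ⟨hy, hys⟩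
    by_cases hb : bef x y = true
    · by_cases hq : pf y = true
      · simp [hb, hx, hq, List.find?_cons]
      · -- find? skips y; every later candidate c has bef x c = true
        have hlater : ∀ c, ys.find? pf = some c → bef x c = true := by
          intro c hc; exact hy c (List.mem_of_find?_eq_some hc) hb
        simp [hb, hx, hq, List.find?_cons]
        cases hfc : ys.find? pf with
        | none => simp
        | some c => simp [hlater c hfc]
    · by_cases hq : pf y = true
      · simp [hb, hq, List.find?_cons]
      · simp [hb, hq, List.find?_cons, ih hys]

-- one sorted insertion on the (already filtered) A side is one genStep on the B side
theorem genScan'_insertBy {α : Type} [DecidableEq α] (q : α → Bool) (len : α → Int) (x : α)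
    (N : List α)
    (h : N.Pairwise (fun a b => (decide (len a < len x)) = true → (decide (len b < len x)) = true))
    (hq : q x = true) :
    genScan' (PySem.List.insertBy (fun a b => decide (len b < len a)) x N) =
      genStep q len (genScan' N) x := by
  cases N with
  | nil => simp [insertBy_nil, genScan', genStep, hq]
  | cons b t =>
    rcases List.pairwise_cons.mp h with ⟨hb1, ht⟩
    rw [insertBy_cons]
    by_cases hbx : (len b < len x)
    · have hne : (b != x) = true := by
        simp only [bne_iff_ne, ne_eq]; intro e; subst e; omega
      simp [hbx, genScan', genStep, hq, List.find?_cons, hne]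
    · by_cases hxb : x = b
      · subst hxb
        rw [if_neg (by simpa using hbx)]
        rw [genScan', genScan']
        rw [find?_insertBy_neg (fun a b => decide (len b < len a)) (fun c => c != x) x t (by simp)]
        simp [genStep, hq, hbx]
      · rw [if_neg (by simpa using hbx)]
        rw [genScan', genScan']
        have hpfx : (x != b) = true := by simp [hxb]
        rw [find?_insertBy_pos (fun a b => decide (len b < len a)) (fun c => c != b) x t ht hpfx]
        cases hfc : t.find? (fun c => c != b) with
        | none => simp [genStep, hq, hbx, hxb, Ne.symm hxb]
        | some c =>
          by_cases hcx : (len c < len x)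
          · simp [genStep, hq, hbx, hxb, Ne.symm hxb, hcx]
          · simp [genStep, hq, hbx, hxb, Ne.symm hxb, hcx]

-- the same, with the filtering still to be done (M is the unfiltered, length-sorted list)
theorem genScan_filter_insertBy {α : Type} [DecidableEq α] (q : α → Bool) (len : α → Int) (x : α)
    (M : List α) (h : M.Pairwise (fun a b => len b ≤ len a)) :
    genScan' ((PySem.List.insertBy (fun a b => decide (len b < len a)) x M).filter q) =
      genStep q len (genScan' (M.filter q)) x := by
  have hfwd : M.Pairwise (fun a b => (decide (len a < len x)) = true → (decide (len b < len x)) = true) := by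
    refine h.imp ?_
    intro a b hab h1
    simp only [decide_eq_true_eq] at *
    omega
  by_cases hq : q x = true
  · rw [filter_insertBy_pos _ _ _ _ hfwd hq]
    exact genScan'_insertBy q len x _ (hfwd.filter q) hq
  · rw [filter_insertBy_neg _ _ _ _ (by simpa using hq)]
    simp [genStep, hq]

-- A's loop is genLoop at the concrete matching test
theorem pvLoopA_eq_genLoop (T : String) (L F : List String) :
    pvLoopA T L F = genLoop (fun st => PySem.Str.isIn (PySem.Str.lower st) T) L F := by
  induction L generalizing F with
  | nil => rfl
  | cons st rest ih => simp only [pvLoopA, genLoop, ih]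

-- B's loop body is genStep at the concrete matching test and length key
theorem pvStep_eq_genStep (T : String) (bs : Option String × Option String) (x : String) :
    pvStep T bs x =
      genStep (fun st => PySem.Str.isIn (PySem.Str.lower st) T) (fun s => PySem.Str.len s) bs x := by
  rcases bs with ⟨b?, s?⟩
  cases b? <;> cases s? <;> rfl

-- A's found-list postprocessing equals pvScan
theorem pvA_eq_scan (T : String) (L : List String) :
    (let found := pvLoopA T L []
     ((if found.length > 0 then PySem.List.pyGet? found 0 else none),
      (if found.length > 1 then PySem.List.pyGet? found 1 else none))) = pvScan T L := by
  rw [pvLoopA_eq_genLoop, genLoop_nil]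
  unfold pvScan genScan'
  cases hf : L.filter (fun st => PySem.Str.isIn (PySem.Str.lower st) T) with
  | nil => simp
  | cons b t =>
    cases hfind : t.find? (fun c => c != b) with
    | none => simp [hfind, PySem.List.pyGet?, PySem.List.pyIdx?]
    | some c => simp [hfind, PySem.List.pyGet?, PySem.List.pyIdx?]

-- the fold correspondence between A's scan of the sorted list and B's left fold
theorem scan_sorted_foldl (T : String) (xs ys : List String) :
    pvScan T (PySem.List.sorted (ys ++ xs) (fun s => PySem.Str.len s) true) =
      xs.foldl (pvStep T) (pvScan T (PySem.List.sorted ys (fun s => PySem.Str.len s) true)) := by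
  induction xs generalizing ys with
  | nil => simp
  | cons x xs ih =>
    have e : PySem.List.sorted (ys ++ [x]) (fun s => PySem.Str.len s) true =
        PySem.List.insertBy (fun a b => decide (PySem.Str.len b < PySem.Str.len a)) x
          (PySem.List.sorted ys (fun s => PySem.Str.len s) true) := by
      rw [PySem.List.sorted_rev_eq_foldl_insertBy, PySem.List.sorted_rev_eq_foldl_insertBy,
        List.foldl_append]
      rfl
    have hpw : (PySem.List.sorted ys (fun s => PySem.Str.len s) true).Pairwise
        (fun a b => PySem.Str.len b ≤ PySem.Str.len a) := PySem.List.sorted_pairwise_rev ..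
    have step : pvScan T (PySem.List.sorted (ys ++ [x]) (fun s => PySem.Str.len s) true) =
        pvStep T (pvScan T (PySem.List.sorted ys (fun s => PySem.Str.len s) true)) x := by
      rw [e, pvStep_eq_genStep]
      unfold pvScan
      exact genScan_filter_insertBy (fun st => PySem.Str.isIn (PySem.Str.lower st) T) (fun s => PySem.Str.len s) x _ hpw
    have assoc : ys ++ x :: xs = (ys ++ [x]) ++ xs := by simp
    rw [assoc, ih (ys ++ [x]), step, List.foldl_cons]

-- ===== VERDICT (by name: the statement is the Claim_ definition above) =====
theorem extract_two_stations_py_spec : Claim_equal_extract_two_stations_py := by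
  intro text station_list _
  unfold Spec_extract_two_stations_py extract_two_stations_py extract_two_stations_py_alt
  have h1 := pvA_eq_scan (pvTextSub text) (PySem.List.sorted station_list (fun s => PySem.Str.len s) true)
  simp only at h1 ⊢
  rw [h1]
  have h2 := scan_sorted_foldl (pvTextSub text) station_list []
  simpa using h2
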